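-- pv_equiv track=rewrite | github.com/Aivon99/Assignments | proveIvo.py | group_parallel_lines
-- ===== SOURCE A (Python) =====
-- from typing import List, Tuple
--
-- def group_parallel_lines(lines: List, is_vertical: bool = True, distance_threshold: int = 15) -> List[List]:
--     """
--     Group parallel lines that are close to each other
--     """
--     if not lines:
--         return []
--
--     groups = []
--     used = [False] * len(lines)
--
--     for i, line1 in enumerate(lines):
--         if used[i]:
--             continue
--
--         group = [line1]
--         used[i] = True
--
--         for j, line2 in enumerate(lines):
--             if used[j] or i == j:
--                 continue
--
--             # Calculate distance between parallel lines
--             if is_vertical: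
--                 dist = abs(line1[0] - line2[0])  # Distance between x coordinates
--             else:
--                 dist = abs(line1[1] - line2[1])  # Distance between y coordinates
--
--             if dist <= distance_threshold:
--                 group.append(line2)
--                 used[j] = True
--
--         groups.append(group)
--
--     return groups
-- ===== SOURCE B (Python) =====
-- def group_parallel_lines(lines, is_vertical=True, distance_threshold=15):
--     """
--     Group parallel lines that are close to each other
--     """
--     k = 0 if is_vertical else 1
--     groups = []
--     rest = list(lines)
--     while rest:
--         seed, tail = rest[0], rest[1:]
--         c = seed[k]
--         near = [l for l in tail if abs(l[k] - c) <= distance_threshold]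
--         rest = [l for l in tail if abs(l[k] - c) > distance_threshold]
--         groups.append([seed] + near)
--     return groups
-- ===== Notes on version B (the rewrite author's own statement) =====
-- stated objective: simpler
-- what changed: B replaces A's used-mask with two nested full scans by a shrinking-remainder loop: take the first remaining line as seed and split the remainder by one filtering pass into its group and the new remainder.
-- outside the precondition, e.g. on group_parallel_lines([[]], True, 15): A returns [[[]]], B raises IndexError
import Mathlib
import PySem

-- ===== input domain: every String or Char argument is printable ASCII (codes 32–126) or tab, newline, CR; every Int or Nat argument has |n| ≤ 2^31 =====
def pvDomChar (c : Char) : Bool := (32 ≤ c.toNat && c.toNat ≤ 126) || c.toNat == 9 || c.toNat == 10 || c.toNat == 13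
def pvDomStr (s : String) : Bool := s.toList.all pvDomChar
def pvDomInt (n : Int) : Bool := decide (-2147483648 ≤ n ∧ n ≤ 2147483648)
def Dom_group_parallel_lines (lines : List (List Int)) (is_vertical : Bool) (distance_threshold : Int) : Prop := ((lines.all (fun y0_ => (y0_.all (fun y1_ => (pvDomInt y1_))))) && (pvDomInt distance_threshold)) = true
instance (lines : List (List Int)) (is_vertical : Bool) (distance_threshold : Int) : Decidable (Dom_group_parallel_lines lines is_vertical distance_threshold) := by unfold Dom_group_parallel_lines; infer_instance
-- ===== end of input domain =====

-- B replaces A's used-mask with its two nested full scans by a shrinking-remainder loop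
-- (seed = first remaining line; one filtering pass splits the remainder into the seed's
-- group and the new remainder): simpler, same return value.

-- ===== PORT A =====
-- dist = abs(line1[k] - line2[k]); pyGetD is exact here because Pre_ keeps the index in range
def pvDist (iv : Bool) (l1 l2 : List Int) : Int :=
  if iv then |PySem.List.pyGetD l1 0 0 - PySem.List.pyGetD l2 0 0|
  else |PySem.List.pyGetD l1 1 0 - PySem.List.pyGetD l2 1 0|

-- body of A's inner "for j, line2 in enumerate(lines)" loop, state = (group, used)
def pvA_inner (iv : Bool) (t : Int) (i : Int) (line1 : List Int)
    (st : List (List Int) × List Bool) (p : Int × List Int) : List (List Int) × List Bool :=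
  if PySem.List.pyGetD st.2 p.1 false || i == p.1 then st
  else if pvDist iv line1 p.2 ≤ t then (st.1 ++ [p.2], PySem.List.pySetD st.2 p.1 true)
  else st

-- body of A's outer "for i, line1 in enumerate(lines)" loop, state = (groups, used)
def pvA_step (lines : List (List Int)) (iv : Bool) (t : Int)
    (st : List (List (List Int)) × List Bool) (p : Int × List Int) :
    List (List (List Int)) × List Bool :=
  if PySem.List.pyGetD st.2 p.1 false then st
  else
    let r := (PySem.List.enumerate lines 0).foldl (pvA_inner iv t p.1 p.2)
        ([p.2], PySem.List.pySetD st.2 p.1 true)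
    (st.1 ++ [r.1], r.2)

def group_parallel_lines (lines : List (List Int)) (is_vertical : Bool) (distance_threshold : Int) : List (List (List Int)) :=
  if lines = [] then []
  else ((PySem.List.enumerate lines 0).foldl (pvA_step lines is_vertical distance_threshold)
        ([], List.replicate lines.length false)).1

-- ===== PORT B =====
-- l[k]; pyGetD is exact here because Pre_ keeps the index in range
def pvCoord (k : Int) (l : List Int) : Int := PySem.List.pyGetD l k 0

-- B's while loop: groups accumulator, remainder shrinks each round
def pvAltGo (k t : Int) (groups : List (List (List Int))) : List (List Int) → List (List (List Int))
  | [] => groups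
  | seed :: tail =>
      pvAltGo k t
        (groups ++ [seed :: tail.filter (fun l => |pvCoord k l - pvCoord k seed| ≤ t)])
        (tail.filter (fun l => t < |pvCoord k l - pvCoord k seed|))
termination_by l => l.length
decreasing_by
  simp only [List.length_cons, List.length_unattach]
  exact Nat.lt_succ_of_le (le_trans (List.length_filter_le _ _) (le_of_eq (List.length_attach)))

def group_parallel_lines_alt (lines : List (List Int)) (is_vertical : Bool) (distance_threshold : Int) : List (List (List Int)) :=
  pvAltGo (if is_vertical then 0 else 1) distance_threshold [] lines

-- ===== PRECONDITION & SPEC =====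
-- Pre_ excludes lines shorter than the accessed coordinate index (Python A raises IndexError
-- whenever lines has ≥ 2 elements); it thereby also excludes length-1 line lists containing
-- such a short line, where A happens to return [[line]] without ever indexing it while B
-- (naturally) still indexes the seed and raises — see the cite in claim.json.
def Pre_group_parallel_lines (lines : List (List Int)) (is_vertical : Bool) (distance_threshold : Int) : Prop :=
  ∀ l ∈ lines, (if is_vertical then 1 else 2) ≤ l.length
instance (lines : List (List Int)) (is_vertical : Bool) (distance_threshold : Int) : Decidable (Pre_group_parallel_lines lines is_vertical distance_threshold) := by unfold Pre_group_parallel_lines; infer_instance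

def pvWitness_group_parallel_lines : List (List Int) × Bool × Int := ([[0, 0], [20, 1], [3, 9]], true, 5)

def Spec_group_parallel_lines (lines : List (List Int)) (is_vertical : Bool) (distance_threshold : Int) (out : List (List (List Int))) : Prop := out = group_parallel_lines_alt lines is_vertical distance_threshold
instance (lines : List (List Int)) (is_vertical : Bool) (distance_threshold : Int) (out : List (List (List Int))) : Decidable (Spec_group_parallel_lines lines is_vertical distance_threshold out) := by unfold Spec_group_parallel_lines; infer_instance

-- ===== CLAIM (what is proved, stated in full; the proofs are below) =====
def Claim_equal_group_parallel_lines : Prop := ∀ (lines : List (List Int)) (is_vertical : Bool) (distance_threshold : Int), Dom_group_parallel_lines lines is_vertical distance_threshold → Pre_group_parallel_lines lines is_vertical distance_threshold → Spec_group_parallel_lines lines is_vertical distance_threshold (group_parallel_lines lines is_vertical distance_threshold)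

-- ===== LEMMAS AND PROOFS =====

-- used-mask bookkeeping: reading a just-set bit / an untouched bit
theorem pv_getD_setD_self (u : List Bool) (i : Int) (v : Bool) (h0 : 0 ≤ i) (h : i.toNat < u.length) :
    PySem.List.pyGetD (PySem.List.pySetD u i v) i false = v := by
  rw [PySem.List.pySetD_of_nonneg _ _ h0, PySem.List.pyGetD_of_nonneg _ _ h0]
  simp [List.getD, h]

theorem pv_getD_setD_ne (u : List Bool) (i q : Int) (v : Bool) (d : Bool) (h0 : 0 ≤ i) (hq : 0 ≤ q)
    (hne : i ≠ q) : PySem.List.pyGetD (PySem.List.pySetD u i v) q d = PySem.List.pyGetD u q d := by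
  rw [PySem.List.pySetD_of_nonneg _ _ h0, PySem.List.pyGetD_of_nonneg _ _ hq, PySem.List.pyGetD_of_nonneg _ _ hq]
  have : i.toNat ≠ q.toNat := by omega
  simp [List.getD, List.getElem?_set_ne this]

theorem pv_mem_enum_bounds {α : Type} (xs : List α) (s : Int) (p : Int × α)
    (h : p ∈ PySem.List.enumerate xs s) : s ≤ p.1 ∧ p.1 < s + xs.length := by
  induction xs generalizing s with
  | nil => simp [PySem.List.enumerate] at h
  | cons x xs ih =>
    rw [PySem.List.enumerate_cons] at h
    rcases List.mem_cons.1 h with h1 | h1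
    · subst h1; simp
    · have := ih (s+1) h1
      simp only [List.length_cons]
      push_cast
      omega

-- List.any_congr needs a pointwise hypothesis; this is the membership-restricted version
theorem pv_any_congr {α : Type} (l : List α) (p q : α → Bool) (h : ∀ x ∈ l, p x = q x) :
    l.any p = l.any q := by
  induction l with
  | nil => rfl
  | cons x xs ih =>
    simp only [List.any_cons, h x (List.mem_cons_self), ih (fun y hy => h y (List.mem_cons_of_mem _ hy))]

-- picked = what A's inner loop appends (and marks used), relative to the mask at loop entry
def pvPick (iv : Bool) (t i : Int) (line1 : List Int) (u : List Bool) (p : Int × List Int) : Bool :=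
  !PySem.List.pyGetD u p.1 false && !(i == p.1) && decide (pvDist iv line1 p.2 ≤ t)

-- A's inner loop does nothing on a stretch of already-used entries
theorem pv_inner_skip (iv : Bool) (t i : Int) (line1 : List Int) (xs : List (List Int)) (s : Int)
    (g : List (List Int)) (u : List Bool)
    (h : ∀ p ∈ PySem.List.enumerate xs s, PySem.List.pyGetD u p.1 false = true) :
    (PySem.List.enumerate xs s).foldl (pvA_inner iv t i line1) (g, u) = (g, u) := by
  induction xs generalizing s with
  | nil => simp [PySem.List.enumerate]
  | cons x xs ih =>
    rw [PySem.List.enumerate_cons, List.foldl_cons]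
    have hx : PySem.List.pyGetD u s false = true :=
      h (s, x) (by rw [PySem.List.enumerate_cons]; exact List.mem_cons_self)
    have hst : pvA_inner iv t i line1 (g, u) (s, x) = (g, u) := by
      simp [pvA_inner, hx]
    rw [hst]
    exact ih (s+1) (fun p hp => h p (by rw [PySem.List.enumerate_cons]; exact List.mem_cons_of_mem _ hp))

-- one pass of A's inner loop: the group it appends is a filter of the scanned entries,
-- and the mask afterwards is the entry mask OR-ed with the picked entries
theorem pv_inner_char (iv : Bool) (t i : Int) (line1 : List Int) (xs : List (List Int)) (s : Int)
    (u : List Bool) (g : List (List Int)) (hs : 0 ≤ s) (hlen : s.toNat + xs.length ≤ u.length) :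
    ((PySem.List.enumerate xs s).foldl (pvA_inner iv t i line1) (g, u)).1
        = g ++ ((PySem.List.enumerate xs s).filter (pvPick iv t i line1 u)).map (·.2)
    ∧ ((PySem.List.enumerate xs s).foldl (pvA_inner iv t i line1) (g, u)).2.length = u.length
    ∧ ∀ q : Int, 0 ≤ q →
        PySem.List.pyGetD ((PySem.List.enumerate xs s).foldl (pvA_inner iv t i line1) (g, u)).2 q false
          = (PySem.List.pyGetD u q false ||
             (PySem.List.enumerate xs s).any (fun p => p.1 == q && pvPick iv t i line1 u p)) := by
  induction xs generalizing s u g with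
  | nil => simp [PySem.List.enumerate]
  | cons x xs ih =>
    rw [PySem.List.enumerate_cons, List.foldl_cons]
    cases hcond : (PySem.List.pyGetD u s false || i == s) with
    | true =>
      have hstep : pvA_inner iv t i line1 (g, u) (s, x) = (g, u) := by
        simp [pvA_inner, hcond]
      have hpick : pvPick iv t i line1 u (s, x) = false := by
        rcases Bool.or_eq_true_iff.1 hcond with h1 | h1 <;> simp [pvPick, h1]
      rw [hstep]
      have hl : (x::xs).length = xs.length + 1 := rfl
      rw [hl] at hlen
      have hlen' : (s+1).toNat + xs.length ≤ u.length := by omega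
      obtain ⟨c1, c2, c3⟩ := ih (s+1) u g (by omega) hlen'
      refine ⟨?_, c2, ?_⟩
      · rw [c1]
        simp [hpick]
      · intro q hq
        rw [c3 q hq, List.any_cons]
        simp [hpick]
    | false =>
      have hcond' := hcond
      simp only [Bool.or_eq_false_iff] at hcond'
      have hl : (x::xs).length = xs.length + 1 := rfl
      rw [hl] at hlen
      have hsu : s.toNat < u.length := by omega
      by_cases hnear : pvDist iv line1 x ≤ t
      · have hstep : pvA_inner iv t i line1 (g, u) (s, x) = (g ++ [x], PySem.List.pySetD u s true) := by
          simp [pvA_inner, hcond, hnear]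
        have hpick : pvPick iv t i line1 u (s, x) = true := by
          simp [pvPick, hcond'.1, hcond'.2, hnear]
        rw [hstep]
        have hlenu' : (PySem.List.pySetD u s true).length = u.length := by
          rw [PySem.List.pySetD_of_nonneg _ _ hs]; exact List.length_set
        obtain ⟨c1, c2, c3⟩ := ih (s+1) (PySem.List.pySetD u s true) (g ++ [x]) (by omega)
          (by rw [hlenu']; omega)
        have htrans : ∀ p ∈ PySem.List.enumerate xs (s+1),
            pvPick iv t i line1 (PySem.List.pySetD u s true) p = pvPick iv t i line1 u p := by
          intro p hp
          have hb := pv_mem_enum_bounds xs (s+1) p hp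
          have hg : PySem.List.pyGetD (PySem.List.pySetD u s true) p.1 false
              = PySem.List.pyGetD u p.1 false :=
            pv_getD_setD_ne u s p.1 true false hs (by omega) (by omega)
          simp [pvPick, hg]
        refine ⟨?_, by rw [c2, hlenu'], ?_⟩
        · rw [c1, List.filter_congr htrans]
          simp [hpick]
        · intro q hq
          rw [c3 q hq, pv_any_congr _ _ _ (fun p hp => by rw [htrans p hp]), List.any_cons]
          by_cases hqs : q = s
          · subst hqs
            rw [pv_getD_setD_self u q true hq hsu]
            simp [hpick, hcond'.1]
          · rw [pv_getD_setD_ne u s q true false hs hq (fun h => hqs h.symm)]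
            have hbq : (s == q) = false := by simp; exact fun h => hqs h.symm
            simp [hbq]
      · have hstep : pvA_inner iv t i line1 (g, u) (s, x) = (g, u) := by
          simp [pvA_inner, hcond, hnear]
        have hpick : pvPick iv t i line1 u (s, x) = false := by
          simp [pvPick, hnear]
        rw [hstep]
        obtain ⟨c1, c2, c3⟩ := ih (s+1) u g (by omega) (by omega)
        refine ⟨?_, c2, ?_⟩
        · rw [c1]
          simp [hpick]
        · intro q hq
          rw [c3 q hq, List.any_cons]
          simp [hpick]

-- enumerate has pairwise-distinct first components, so 'any' keyed on an index is a lookup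
theorem pv_enum_any_fst {α : Type} (xs : List α) (s : Int) (p : Int × α)
    (hp : p ∈ PySem.List.enumerate xs s) (pk : Int × α → Bool) :
    (PySem.List.enumerate xs s).any (fun r => r.1 == p.1 && pk r) = pk p := by
  induction xs generalizing s with
  | nil => simp [PySem.List.enumerate] at hp
  | cons y ys ih =>
    rw [PySem.List.enumerate_cons] at hp ⊢
    rw [List.any_cons]
    rcases List.mem_cons.1 hp with h1 | h1
    · subst h1
      simp only [beq_self_eq_true, Bool.true_and]
      cases hpk : pk (s, y)
      · simp only [hpk, Bool.false_or]
        apply List.any_eq_false.2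
        intro r hr
        have hb := pv_mem_enum_bounds ys (s+1) r hr
        have : (r.1 == s) = false := by simp; omega
        simp [this]
      · simp [hpk]
    · have hb := pv_mem_enum_bounds ys (s+1) p h1
      have : (s == p.1) = false := by simp; omega
      simp only [this, Bool.false_and, Bool.false_or]
      exact ih (s+1) h1

-- a filter whose second factor reads only the payload commutes with projecting the payload
theorem pv_filter_map_snd {α β : Type} (l : List (β × α)) (a : β × α → Bool) (b : α → Bool) :
    (l.filter (fun p => a p && b p.2)).map (·.2) = ((l.filter a).map (·.2)).filter b := by
  induction l with
  | nil => rfl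
  | cons x xs ih =>
    cases ha : a x <;> cases hb : b x.2 <;>
      simp [List.filter_cons, ha, hb, ih]

theorem pv_dist_coord (iv : Bool) (line1 l : List Int) :
    pvDist iv line1 l = |pvCoord (if iv then 0 else 1) l - pvCoord (if iv then 0 else 1) line1| := by
  cases iv <;> simp [pvDist, pvCoord, abs_sub_comm]

-- main invariant: A's outer loop, resumed after a fully-used prefix, produces exactly
-- B's loop applied to the still-unused lines (in order)
theorem pv_outer_char (iv : Bool) (t : Int) (lines pre rest : List (List Int)) (u : List Bool)
    (g : List (List (List Int)))
    (hsplit : lines = pre ++ rest) (hlen : u.length = lines.length)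
    (hused : ∀ q : Int, 0 ≤ q → q < (pre.length : Int) → PySem.List.pyGetD u q false = true) :
    ((PySem.List.enumerate rest (pre.length : Int)).foldl (pvA_step lines iv t) (g, u)).1
      = pvAltGo (if iv then 0 else 1) t g
          (((PySem.List.enumerate rest (pre.length : Int)).filter
              (fun p => !PySem.List.pyGetD u p.1 false)).map (·.2)) := by
  induction rest generalizing pre u g with
  | nil => simp [PySem.List.enumerate, pvAltGo]
  | cons line1 rest' ih =>
    have hs : (0:Int) ≤ (pre.length : Int) := by positivity
    have hlensplit : lines.length = pre.length + 1 + rest'.length := by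
      rw [hsplit]; simp [List.length_append]; omega
    rw [PySem.List.enumerate_cons, List.foldl_cons]
    cases hu : PySem.List.pyGetD u (pre.length : Int) false with
    | true =>
      have hstep : pvA_step lines iv t (g, u) ((pre.length : Int), line1) = (g, u) := by
        simp [pvA_step, hu]
      rw [hstep]
      have hc : (((pre ++ [line1]).length : Nat) : Int) = (pre.length : Int) + 1 := by
        simp
      have hih := ih (pre ++ [line1]) u g
        (by rw [hsplit, List.append_assoc]; rfl) hlen
        (by intro q hq0 hq1; rw [hc] at hq1
            by_cases hqs : q = (pre.length : Int)
            · rw [hqs]; exact hu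
            · exact hused q hq0 (by omega))
      rw [hc] at hih
      rw [hih]
      have hfc : (((pre.length : Int), line1) :: PySem.List.enumerate rest' ((pre.length : Int)+1)).filter
            (fun p => !PySem.List.pyGetD u p.1 false)
          = (PySem.List.enumerate rest' ((pre.length : Int)+1)).filter
            (fun p => !PySem.List.pyGetD u p.1 false) := by
        simp [hu]
      rw [hfc]
    | false =>
      have hsu : pre.length < u.length := by omega
      set u1 := PySem.List.pySetD u (pre.length:Int) true with hu1
      set r := (PySem.List.enumerate lines 0).foldl (pvA_inner iv t (pre.length:Int) line1) ([line1], u1) with hr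
      have hstep : pvA_step lines iv t (g, u) ((pre.length:Int), line1) = (g ++ [r.1], r.2) := by
        simp [pvA_step, hu, hu1, hr]
      rw [hstep]
      have hdec : PySem.List.enumerate lines 0
          = PySem.List.enumerate pre 0 ++ ((pre.length:Int), line1)
              :: PySem.List.enumerate rest' ((pre.length:Int)+1) := by
        rw [hsplit, PySem.List.enumerate_append, PySem.List.enumerate_cons]; simp
      have hskip : ∀ p ∈ PySem.List.enumerate pre 0, PySem.List.pyGetD u1 p.1 false = true := by
        intro p hp
        have hb := pv_mem_enum_bounds pre 0 p hp
        rw [hu1, pv_getD_setD_ne u _ p.1 true false hs (by omega) (by omega)]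
        exact hused p.1 hb.1 (by simpa using hb.2)
      have hheadbit : PySem.List.pyGetD u1 (pre.length:Int) false = true := by
        rw [hu1]; exact pv_getD_setD_self u _ true hs (by omega)
      have hrfold : r = (PySem.List.enumerate rest' ((pre.length:Int)+1)).foldl
          (pvA_inner iv t (pre.length:Int) line1) ([line1], u1) := by
        rw [hr, hdec, List.foldl_append]
        rw [pv_inner_skip iv t (pre.length:Int) line1 pre 0 [line1] u1 hskip, List.foldl_cons]
        have hone : pvA_inner iv t (pre.length:Int) line1 ([line1], u1) ((pre.length:Int), line1)
            = ([line1], u1) := by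
          simp [pvA_inner, hheadbit]
        rw [hone]
      have hlenu1 : u1.length = u.length := by
        rw [hu1, PySem.List.pySetD_of_nonneg _ _ hs]; exact List.length_set
      obtain ⟨c1, c2, c3⟩ := pv_inner_char iv t (pre.length:Int) line1 rest' ((pre.length:Int)+1)
        u1 [line1] (by omega) (by rw [hlenu1]; omega)
      rw [← hrfold] at c1 c2 c3
      have hpick' : ∀ p ∈ PySem.List.enumerate rest' ((pre.length:Int)+1),
          pvPick iv t (pre.length:Int) line1 u1 p
            = (!PySem.List.pyGetD u p.1 false && decide (pvDist iv line1 p.2 ≤ t)) := by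
        intro p hp
        have hb := pv_mem_enum_bounds rest' ((pre.length:Int)+1) p hp
        have hgu : PySem.List.pyGetD u1 p.1 false = PySem.List.pyGetD u p.1 false := by
          rw [hu1]; exact pv_getD_setD_ne u _ p.1 true false hs (by omega) (by omega)
        have hne : ((pre.length:Int) == p.1) = false := by simp; omega
        simp [pvPick, hgu, hne]
      -- the group built for this seed
      have hgrp : r.1 = line1 ::
          ((((PySem.List.enumerate rest' ((pre.length:Int)+1)).filter
              (fun p => !PySem.List.pyGetD u p.1 false)).map (·.2)).filter
            (fun l => |pvCoord (if iv then 0 else 1) l - pvCoord (if iv then 0 else 1) line1| ≤ t)) := by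
        rw [c1, List.filter_congr hpick']
        rw [pv_filter_map_snd _ (fun p => !PySem.List.pyGetD u p.1 false)
              (fun l => decide (pvDist iv line1 l ≤ t))]
        rw [List.filter_congr (fun l _ => by rw [pv_dist_coord] : ∀ l ∈ _, _)]
        rfl
      -- the new remainder
      have hrem : ((PySem.List.enumerate rest' ((pre.length:Int)+1)).filter
              (fun p => !PySem.List.pyGetD r.2 p.1 false)).map (·.2)
          = (((PySem.List.enumerate rest' ((pre.length:Int)+1)).filter
              (fun p => !PySem.List.pyGetD u p.1 false)).map (·.2)).filter
            (fun l => t < |pvCoord (if iv then 0 else 1) l - pvCoord (if iv then 0 else 1) line1|) := by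
        have hcong : ∀ p ∈ PySem.List.enumerate rest' ((pre.length:Int)+1),
            (!PySem.List.pyGetD r.2 p.1 false)
              = (!PySem.List.pyGetD u p.1 false && decide (t < pvDist iv line1 p.2)) := by
          intro p hp
          have hb := pv_mem_enum_bounds rest' ((pre.length:Int)+1) p hp
          have hq0 : (0:Int) ≤ p.1 := by omega
          rw [c3 p.1 hq0, pv_enum_any_fst rest' ((pre.length:Int)+1) p hp, hpick' p hp]
          have hgu : PySem.List.pyGetD u1 p.1 false = PySem.List.pyGetD u p.1 false := by
            rw [hu1]; exact pv_getD_setD_ne u _ p.1 true false hs (by omega) (by omega)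
          rw [hgu]
          by_cases hn : pvDist iv line1 p.2 ≤ t <;>
            cases hb2 : PySem.List.pyGetD u p.1 false <;>
            simp [hn, lt_iff_not_ge]
        rw [List.filter_congr hcong]
        rw [pv_filter_map_snd _ (fun p => !PySem.List.pyGetD u p.1 false)
              (fun l => decide (t < pvDist iv line1 l))]
        rw [List.filter_congr (fun l _ => by rw [pv_dist_coord] : ∀ l ∈ _, _)]
      -- apply the induction hypothesis after this seed's pass
      have hc : (((pre ++ [line1]).length : Nat) : Int) = (pre.length : Int) + 1 := by simp
      have hih := ih (pre ++ [line1]) r.2 (g ++ [r.1])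
        (by rw [hsplit, List.append_assoc]; rfl)
        (by rw [c2, hlenu1, hlen])
        (by intro q hq0 hq1
            rw [hc] at hq1
            rw [c3 q hq0]
            by_cases hqs : q = (pre.length : Int)
            · rw [hqs, hheadbit, Bool.true_or]
            · have : PySem.List.pyGetD u1 q false = PySem.List.pyGetD u q false := by
                rw [hu1]; exact pv_getD_setD_ne u _ q true false hs hq0 (fun h => hqs h.symm)
              rw [this, hused q hq0 (by omega), Bool.true_or])
      rw [hc] at hih
      rw [hih, hrem]
      -- unfold B's loop once on the matching remainder
      have hhead : ((((pre.length:Int), line1) :: PySem.List.enumerate rest' ((pre.length:Int)+1)).filter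
            (fun p => !PySem.List.pyGetD u p.1 false)).map (·.2)
          = line1 :: ((PySem.List.enumerate rest' ((pre.length:Int)+1)).filter
              (fun p => !PySem.List.pyGetD u p.1 false)).map (·.2) := by
        simp [hu]
      rw [hhead]
      conv_rhs => rw [pvAltGo]
      rw [hgrp]

theorem pv_main (lines : List (List Int)) (iv : Bool) (t : Int) :
    group_parallel_lines lines iv t = group_parallel_lines_alt lines iv t := by
  unfold group_parallel_lines group_parallel_lines_alt
  by_cases hnil : lines = []
  · rw [if_pos hnil, hnil]
    simp [pvAltGo]
  · rw [if_neg hnil]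
    have h := pv_outer_char iv t lines [] lines (List.replicate lines.length false) []
      (by simp) (by simp) (by intro q hq0 hq1; exfalso; simp at hq1; omega)
    simp only [List.length_nil, Nat.cast_zero] at h
    rw [h]
    congr 1
    have hcong : ∀ p ∈ PySem.List.enumerate lines 0,
        (!PySem.List.pyGetD (List.replicate lines.length false) p.1 false)
          = (fun (_ : Int × List Int) => true) p := by
      intro p hp
      have hb := pv_mem_enum_bounds lines 0 p hp
      rw [PySem.List.pyGetD_of_nonneg _ _ hb.1]
      simp [List.getD, List.getElem?_replicate]
      split <;> simp
    rw [List.filter_congr hcong, List.filter_true, PySem.List.map_snd_enumerate]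

-- ===== VERDICT (by name: the statement is the Claim_ definition above) =====
theorem group_parallel_lines_spec : Claim_equal_group_parallel_lines := by
  intro lines is_vertical distance_threshold _ _
  unfold Spec_group_parallel_lines
  exact pv_main lines is_vertical distance_threshold
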